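-- pv_equiv track=rewrite | github.com/AIForHindustan/intraday_trading | crawlers/market_activity_tiers.py | is_tier_3_nifty50
-- ===== SOURCE A (Python) =====
-- TIER_3_NIFTY50_EQUITIES = {
--     # Remaining Nifty 50 stocks (not in Tier 2)
--     # These are the Nifty 50 equities that are NOT in Tier 2
--     'ADANIPORTS',
--     'APOLLOHOSP',
--     'BAJAJ-AUTO',
--     'BAJAJFINSV',
--     'BEL',
--     'CIPLA',
--     'DRREDDY',
--     'ETERNAL',
--     'GRASIM',
--     'HDFCLIFE',
--     'HINDALCO',
--     'JIOFIN',
--     'MAXHEALTH',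
--     'SHRIRAMFIN',
--     'TRENT',
--     # Note: ULTRACEMCO is in Tier 2, so excluded from Tier 3
--     # Tier 2 takes priority - these are the remaining Nifty 50 stocks (17 total)
-- }
--
-- def is_tier_3_nifty50(symbol: str) -> bool:
--     """Check if symbol is a Tier 3 Nifty 50 equity"""
--     # Check exact match
--     if symbol in TIER_3_NIFTY50_EQUITIES:
--         return True
--
--     # Check if symbol contains tier 3 equity name (for options/futures)
--     symbol_upper = symbol.upper()
--     for tier3_equity in TIER_3_NIFTY50_EQUITIES:
--         if tier3_equity.upper() in symbol_upper:
--             return True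
--
--     return False
-- ===== SOURCE B (Python) =====
-- _TIER3 = ('ADANIPORTS', 'APOLLOHOSP', 'BAJAJ-AUTO', 'BAJAJFINSV', 'BEL',
--           'CIPLA', 'DRREDDY', 'ETERNAL', 'GRASIM', 'HDFCLIFE',
--           'HINDALCO', 'JIOFIN', 'MAXHEALTH', 'SHRIRAMFIN', 'TRENT')
--
-- _BY_FIRST = {}
-- for _e in _TIER3:
--     _BY_FIRST.setdefault(_e[0], []).append(_e)
--
--
-- def is_tier_3_nifty50(symbol: str) -> bool:
--     """Scan the uppercased symbol once; at each position test only the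
--     tier-3 names that start with that character."""
--     u = symbol.upper()
--     for i in range(len(u)):
--         for cand in _BY_FIRST.get(u[i], ()):
--             if u.startswith(cand, i):
--                 return True
--     return False
-- ===== Notes on version B (the rewrite author's own statement) =====
-- stated objective: alternative
-- what changed: Replaced the per-name substring loop (plus the redundant exact-match check) by a single left-to-right scan of the uppercased symbol with a first-letter dictionary dispatch: at each position only the names starting with that character are tested with startswith.
import Mathlib
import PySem

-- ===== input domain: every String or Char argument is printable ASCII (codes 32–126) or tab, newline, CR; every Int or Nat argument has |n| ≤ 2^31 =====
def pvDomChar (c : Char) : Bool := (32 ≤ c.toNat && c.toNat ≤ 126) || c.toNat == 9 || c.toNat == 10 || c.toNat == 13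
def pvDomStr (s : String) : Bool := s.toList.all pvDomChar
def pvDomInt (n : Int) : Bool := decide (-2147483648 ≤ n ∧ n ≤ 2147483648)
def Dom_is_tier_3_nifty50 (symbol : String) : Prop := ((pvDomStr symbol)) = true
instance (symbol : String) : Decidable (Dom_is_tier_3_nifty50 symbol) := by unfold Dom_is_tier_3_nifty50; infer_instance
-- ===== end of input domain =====

-- B replaces A's per-name substring loop by one scan of the uppercased symbol with a
-- first-letter dictionary dispatch (objective: alternative, same observable behaviour).

-- ===== PORT A =====
def TIER_3_NIFTY50_EQUITIES : PySem.Set String := PySem.Set.ofList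
  ["ADANIPORTS", "APOLLOHOSP", "BAJAJ-AUTO", "BAJAJFINSV", "BEL",
   "CIPLA", "DRREDDY", "ETERNAL", "GRASIM", "HDFCLIFE",
   "HINDALCO", "JIOFIN", "MAXHEALTH", "SHRIRAMFIN", "TRENT"]

def is_tier_3_nifty50 (symbol : String) : Bool :=
  if PySem.Set.contains TIER_3_NIFTY50_EQUITIES symbol then true
  else
    let symbol_upper := PySem.Str.upper symbol
    -- for-loop with early 'return True' over the set; order-independent result
    TIER_3_NIFTY50_EQUITIES.any (fun tier3_equity =>
      PySem.Str.isIn (PySem.Str.upper tier3_equity) symbol_upper)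

-- ===== PORT B =====
-- the tier-3 names as char lists (entries of Source B's _TIER3)
def eADA : List Char := ['A','D','A','N','I','P','O','R','T','S']
def eAPO : List Char := ['A','P','O','L','L','O','H','O','S','P']
def eBAA : List Char := ['B','A','J','A','J','-','A','U','T','O']
def eBAF : List Char := ['B','A','J','A','J','F','I','N','S','V']
def eBEL : List Char := ['B','E','L']
def eCIP : List Char := ['C','I','P','L','A']
def eDRR : List Char := ['D','R','R','E','D','D','Y']
def eETE : List Char := ['E','T','E','R','N','A','L']
def eGRA : List Char := ['G','R','A','S','I','M']
def eHDF : List Char := ['H','D','F','C','L','I','F','E']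
def eHIN : List Char := ['H','I','N','D','A','L','C','O']
def eJIO : List Char := ['J','I','O','F','I','N']
def eMAX : List Char := ['M','A','X','H','E','A','L','T','H']
def eSHR : List Char := ['S','H','R','I','R','A','M','F','I','N']
def eTRE : List Char := ['T','R','E','N','T']

-- Source B's _BY_FIRST dict, built at module load in insertion order of first letters
def pvByFirst : PySem.Dict Char (List (List Char)) :=
  PySem.Dict.mk
  [('A', [eADA, eAPO]), ('B', [eBAA, eBAF, eBEL]), ('C', [eCIP]), ('D', [eDRR]),
   ('E', [eETE]), ('G', [eGRA]), ('H', [eHDF, eHIN]), ('J', [eJIO]),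
   ('M', [eMAX]), ('S', [eSHR]), ('T', [eTRE])]

-- the 'for i in range(len(u))' scan: at suffix c::rest (position i), test the
-- candidates keyed by u[i] with u.startswith(cand, i), i.e. isPrefixOf on the suffix
def pvScan : List Char → Bool
  | [] => false
  | c :: rest =>
    ((PySem.Dict.getD pvByFirst c []).any (fun cand => List.isPrefixOf cand (c :: rest)))
      || pvScan rest

def is_tier_3_nifty50_alt (symbol : String) : Bool :=
  pvScan (PySem.Chars.upper symbol.toList)

-- ===== PRECONDITION & SPEC =====
def Spec_is_tier_3_nifty50 (symbol : String) (out : Bool) : Prop := out = is_tier_3_nifty50_alt symbol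
instance (symbol : String) (out : Bool) : Decidable (Spec_is_tier_3_nifty50 symbol out) := by unfold Spec_is_tier_3_nifty50; infer_instance

-- ===== CLAIM (what is proved, stated in full; the proofs are below) =====
def Claim_equal_is_tier_3_nifty50 : Prop := ∀ (symbol : String), Dom_is_tier_3_nifty50 symbol → Spec_is_tier_3_nifty50 symbol (is_tier_3_nifty50 symbol)

-- ===== LEMMAS AND PROOFS =====

-- the names, list-of-char-lists form, in A's set order
def tier3L : List (List Char) := [eADA, eAPO, eBAA, eBAF, eBEL, eCIP, eDRR, eETE,
  eGRA, eHDF, eHIN, eJIO, eMAX, eSHR, eTRE]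

-- any candidate list the dict returns is among the 15 names
set_option maxHeartbeats 1000000 in
lemma getD_subset (c : Char) : PySem.Dict.getD pvByFirst c [] ⊆ tier3L := by
  simp only [pvByFirst, PySem.Dict.getD, PySem.Dict.get?_mk_cons]
  split_ifs <;> simp [tier3L, PySem.Dict.get?]

-- a name that is a prefix of c :: rest is among the candidates keyed by c
lemma mem_getD_of_prefix {c : Char} {rest e : List Char}
    (he : e ∈ tier3L) (hp : e <+: c :: rest) : e ∈ PySem.Dict.getD pvByFirst c [] := by
  fin_cases he <;>
    · obtain ⟨t, ht⟩ := hp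
      injection ht with h1 _
      subst h1
      decide

lemma pvScan_iff (s : List Char) : pvScan s = true ↔ ∃ e ∈ tier3L, e <:+: s := by
  induction s with
  | nil => simp [pvScan]; decide
  | cons c rest ih =>
    rw [pvScan]
    simp only [Bool.or_eq_true, List.any_eq_true, List.isPrefixOf_iff_prefix, ih]
    constructor
    · rintro (⟨e, he, hp⟩ | ⟨e, he, hi⟩)
      · exact ⟨e, getD_subset c he, hp.isInfix⟩
      · exact ⟨e, he, hi.trans (List.suffix_cons c rest).isInfix⟩
    · rintro ⟨e, he, hi⟩
      rcases List.infix_cons_iff.mp hi with hp | hi'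
      · exact Or.inl ⟨e, mem_getD_of_prefix he hp, hp⟩
      · exact Or.inr ⟨e, he, hi'⟩

-- A's containment loop, characterised the same way
lemma anyIsIn_iff (u : List Char) :
    (tier3L.any (fun e => PySem.Chars.isIn e u)) = true ↔ ∃ e ∈ tier3L, e <:+: u := by
  simp [List.any_eq_true, PySem.Chars.isIn_iff_infix]

-- ===== VERDICT (by name: the statement is the Claim_ definition above) =====
-- the set literal, evaluated
lemma set_eval : (TIER_3_NIFTY50_EQUITIES : List String) =
    ["ADANIPORTS", "APOLLOHOSP", "BAJAJ-AUTO", "BAJAJFINSV", "BEL",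
     "CIPLA", "DRREDDY", "ETERNAL", "GRASIM", "HDFCLIFE",
     "HINDALCO", "JIOFIN", "MAXHEALTH", "SHRIRAMFIN", "TRENT"] := by decide

theorem is_tier_3_nifty50_spec : Claim_equal_is_tier_3_nifty50 := by
  intro symbol _
  unfold Spec_is_tier_3_nifty50 is_tier_3_nifty50
  rw [set_eval]
  by_cases h : PySem.Set.contains
      ["ADANIPORTS", "APOLLOHOSP", "BAJAJ-AUTO", "BAJAJFINSV", "BEL",
       "CIPLA", "DRREDDY", "ETERNAL", "GRASIM", "HDFCLIFE",
       "HINDALCO", "JIOFIN", "MAXHEALTH", "SHRIRAMFIN", "TRENT"] symbol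
  · -- exact-match branch: symbol is one of the 15 (uppercase) literals
    rw [if_pos h]
    have hm : symbol ∈
        ["ADANIPORTS", "APOLLOHOSP", "BAJAJ-AUTO", "BAJAJFINSV", "BEL",
         "CIPLA", "DRREDDY", "ETERNAL", "GRASIM", "HDFCLIFE",
         "HINDALCO", "JIOFIN", "MAXHEALTH", "SHRIRAMFIN", "TRENT"] := by
      simpa [PySem.Set.contains] using h
    simp only [List.mem_cons, List.not_mem_nil, or_false] at hm
    rcases hm with rfl|rfl|rfl|rfl|rfl|rfl|rfl|rfl|rfl|rfl|rfl|rfl|rfl|rfl|rfl <;> decide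
  · rw [if_neg h]
    show _ = is_tier_3_nifty50_alt symbol
    unfold is_tier_3_nifty50_alt
    have hA : (List.any
        ["ADANIPORTS", "APOLLOHOSP", "BAJAJ-AUTO", "BAJAJFINSV", "BEL",
         "CIPLA", "DRREDDY", "ETERNAL", "GRASIM", "HDFCLIFE",
         "HINDALCO", "JIOFIN", "MAXHEALTH", "SHRIRAMFIN", "TRENT"] (fun e =>
        PySem.Str.isIn (PySem.Str.upper e) (PySem.Str.upper symbol)))
        = tier3L.any (fun e => PySem.Chars.isIn e (PySem.Chars.upper symbol.toList)) := by
      simp only [tier3L, List.any_cons, List.any_nil,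
        PySem.Str.isIn_eq, PySem.Str.toList_upper]
      rw [show PySem.Chars.upper "ADANIPORTS".toList = eADA from by decide,
          show PySem.Chars.upper "APOLLOHOSP".toList = eAPO from by decide,
          show PySem.Chars.upper "BAJAJ-AUTO".toList = eBAA from by decide,
          show PySem.Chars.upper "BAJAJFINSV".toList = eBAF from by decide,
          show PySem.Chars.upper "BEL".toList = eBEL from by decide,
          show PySem.Chars.upper "CIPLA".toList = eCIP from by decide,
          show PySem.Chars.upper "DRREDDY".toList = eDRR from by decide,
          show PySem.Chars.upper "ETERNAL".toList = eETE from by decide,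
          show PySem.Chars.upper "GRASIM".toList = eGRA from by decide,
          show PySem.Chars.upper "HDFCLIFE".toList = eHDF from by decide,
          show PySem.Chars.upper "HINDALCO".toList = eHIN from by decide,
          show PySem.Chars.upper "JIOFIN".toList = eJIO from by decide,
          show PySem.Chars.upper "MAXHEALTH".toList = eMAX from by decide,
          show PySem.Chars.upper "SHRIRAMFIN".toList = eSHR from by decide,
          show PySem.Chars.upper "TRENT".toList = eTRE from by decide]
    rw [hA]
    exact Bool.eq_iff_iff.mpr (by rw [anyIsIn_iff, pvScan_iff])
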